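-- pv_equiv track=rewrite | github.com/dungtran90/advent_of_code | day_6.py | count_orbits_with_key
-- ===== SOURCE A (Python) =====
-- def count_orbits_with_key(key, orbit_map):
--     total = 0
--     keys = orbit_map[key]
--     while(len(keys) > 0):
--         keys_temp = []
--         for k in keys:
--             total += 1
--             if k in orbit_map:
--                 keys_temp.extend(orbit_map[k])
--         keys = keys_temp
--
--     return total
-- ===== SOURCE B (Python) =====
-- def count_orbits_with_key(key, orbit_map):
--     return sum(
--         1 + (count_orbits_with_key(k, orbit_map) if k in orbit_map else 0)
--         for k in orbit_map[key]
--     )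
-- ===== Notes on version B (the rewrite author's own statement) =====
-- stated objective: simpler
-- what changed: A's explicit BFS with a level queue and running total is replaced by a one-expression recursion over the orbit tree: sum over the key's children of 1 plus the recursive count when the child is itself a key.
import Mathlib
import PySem

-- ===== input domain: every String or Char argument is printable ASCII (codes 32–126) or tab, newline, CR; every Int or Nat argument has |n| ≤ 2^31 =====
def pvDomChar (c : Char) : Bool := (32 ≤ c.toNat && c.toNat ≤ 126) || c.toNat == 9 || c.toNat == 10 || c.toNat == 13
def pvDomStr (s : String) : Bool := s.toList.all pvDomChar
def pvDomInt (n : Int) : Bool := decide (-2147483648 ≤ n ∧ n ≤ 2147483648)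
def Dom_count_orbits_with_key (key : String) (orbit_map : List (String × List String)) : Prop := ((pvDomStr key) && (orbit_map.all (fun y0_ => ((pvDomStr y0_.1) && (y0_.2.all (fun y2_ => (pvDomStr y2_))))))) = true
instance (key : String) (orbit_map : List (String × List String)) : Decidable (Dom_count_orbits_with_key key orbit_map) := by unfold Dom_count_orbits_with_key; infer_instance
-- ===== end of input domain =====

-- B replaces A's explicit BFS level-queue with a direct recursion over the orbit tree (simpler, same cost).


-- ===== PORT A =====
-- orbit_map is a Python dict: association list, first match wins (dicts have unique keys anyway)
def pvChildren (m : List (String × List String)) (k : String) : List String :=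
  (m.lookup k).getD []

-- the while-loop of A; the Nat argument is a fuel guard for totality only
-- (orbit_map.length + 2 levels always suffice on the inputs admitted by Pre_, where A terminates)
def pvLoopA (m : List (String × List String)) : Nat → List String → Int → Int
  | 0, _, total => total
  | f+1, keys, total =>
    if keys.length > 0 then
      -- for k in keys: total += 1; if k in orbit_map: keys_temp.extend(orbit_map[k])
      let st := keys.foldl
        (fun (st : Int × List String) k =>
          (st.1 + 1, if (m.lookup k).isSome then st.2 ++ pvChildren m k else st.2))
        (total, ([] : List String))
      pvLoopA m f st.2 st.1
    else total

def count_orbits_with_key (key : String) (orbit_map : List (String × List String)) : Int :=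
  match orbit_map.lookup key with
  | none => 0  -- KeyError in Python; excluded by Pre_
  | some keys => pvLoopA orbit_map (orbit_map.length + 2) keys 0

-- ===== PORT B =====
-- the recursive calls of B (always made with k a key of the map); fuel guard for totality only
def pvRecB (m : List (String × List String)) : Nat → String → Int
  | 0, _ => 0
  | f+1, key =>
    (pvChildren m key).foldl
      (fun acc k => acc + (1 + (if (m.lookup k).isSome then pvRecB m f k else 0))) 0

def count_orbits_with_key_alt (key : String) (orbit_map : List (String × List String)) : Int :=
  match orbit_map.lookup key with
  | none => 0  -- KeyError in Python; excluded by Pre_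
  | some ks =>
    -- sum(1 + (count_orbits_with_key(k, orbit_map) if k in orbit_map else 0) for k in orbit_map[key])
    ks.foldl
      (fun acc k => acc + (1 + (if (orbit_map.lookup k).isSome then pvRecB orbit_map (orbit_map.length + 1) k else 0))) 0

-- ===== PRECONDITION & SPEC =====
-- one monotone step of the reachable-set closure
def pvStepR (m : List (String × List String)) (S : PySem.Set String) : PySem.Set String :=
  PySem.Set.update S (S.flatMap (fun v => pvChildren m v))

-- set of vertices reachable (in ≥ 0 steps) from the elements of start; the iteration count
-- is large enough that the monotone closure has saturated
def pvReach (m : List (String × List String)) (start : List String) : List String :=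
  (pvStepR m)^[(m.flatMap (fun p => p.2)).length + start.length + 1] (PySem.Set.ofList start)

-- Pre_ = exactly the inputs on which Python A returns: key is a key of the dict (else KeyError),
-- and no cycle is reachable from key (else the BFS loop never empties and A diverges).
def Pre_count_orbits_with_key (key : String) (orbit_map : List (String × List String)) : Prop :=
  (orbit_map.lookup key).isSome = true ∧
  ∀ v ∈ pvReach orbit_map [key], v ∉ pvReach orbit_map (pvChildren orbit_map v)

instance (key : String) (orbit_map : List (String × List String)) : Decidable (Pre_count_orbits_with_key key orbit_map) := by
  unfold Pre_count_orbits_with_key; infer_instance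

def pvWitness_count_orbits_with_key : String × (List (String × List String)) :=
  ("COM", [("COM", ["A", "B"]), ("A", ["C", "B"])])

def Spec_count_orbits_with_key (key : String) (orbit_map : List (String × List String)) (out : Int) : Prop := out = count_orbits_with_key_alt key orbit_map
instance (key : String) (orbit_map : List (String × List String)) (out : Int) : Decidable (Spec_count_orbits_with_key key orbit_map out) := by unfold Spec_count_orbits_with_key; infer_instance

-- ===== CLAIM (what is proved, stated in full; the proofs are below) =====
def Claim_equal_count_orbits_with_key : Prop := ∀ (key : String) (orbit_map : List (String × List String)), Dom_count_orbits_with_key key orbit_map → Pre_count_orbits_with_key key orbit_map → Spec_count_orbits_with_key key orbit_map (count_orbits_with_key key orbit_map)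

-- ===== LEMMAS AND PROOFS =====
-- the common denominator of both ports: pvG m f k = (1 + number of continuing paths out of k),
-- truncated at depth f
def pvG (m : List (String × List String)) : Nat → String → Int
  | 0, _ => 0
  | f+1, k => 1 + (if (m.lookup k).isSome then ((pvChildren m k).map (pvG m f)).sum else 0)

theorem pvG_zero_sum (m : List (String × List String)) (l : List String) :
    (l.map (pvG m 0)).sum = 0 := by
  induction l with
  | nil => rfl
  | cons x t ih => simp [pvG]

theorem pvG_succ_sum (m : List (String × List String)) (f : Nat) (keys : List String) :
    (keys.map (pvG m (f+1))).sum =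
      keys.length +
        ((keys.flatMap (fun k => if (m.lookup k).isSome then pvChildren m k else [])).map (pvG m f)).sum := by
  induction keys with
  | nil => simp
  | cons x t ih =>
    rw [List.map_cons, List.sum_cons, List.flatMap_cons, List.map_append, List.sum_append,
      List.length_cons, ih, pvG]
    push_cast
    split <;> [ring; (simp; ring)]

theorem pvLoopA_eq (m : List (String × List String)) :
    ∀ (f : Nat) (keys : List String) (total : Int),
      pvLoopA m f keys total = total + (keys.map (pvG m f)).sum := by
  intro f
  induction f with
  | zero => intro keys total; simp [pvLoopA, pvG_zero_sum]
  | succ f ih =>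
    intro keys total
    rw [pvLoopA]
    split
    · rw [PySem.List.foldl_prod_mk
        (f := fun (a : Int) (_ : String) => a + 1)
        (g := fun (acc : List String) k => if (m.lookup k).isSome then acc ++ pvChildren m k else acc)]
      rw [ih]
      have hbody : (fun (acc : List String) k => if (m.lookup k).isSome then acc ++ pvChildren m k else acc) =
          (fun (acc : List String) k => acc ++ (if (m.lookup k).isSome then pvChildren m k else [])) := by
        funext acc k; split <;> simp
      have h2 : keys.foldl (fun (acc : List String) k => if (m.lookup k).isSome then acc ++ pvChildren m k else acc) [] =
          keys.flatMap (fun k => if (m.lookup k).isSome then pvChildren m k else []) := by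
        rw [hbody]
        simpa using PySem.List.foldl_append_eq_flatMap
          (g := fun k => if (m.lookup k).isSome then pvChildren m k else []) (l := keys) (acc := ([] : List String))
      have h1 : keys.foldl (fun (a : Int) (_ : String) => a + 1) total = total + keys.length := by
        simpa using PySem.List.foldl_add (g := fun (_ : String) => (1 : Int)) (l := keys) (a := total)
      rw [h2, h1, pvG_succ_sum]
      ring
    · rename_i hlen
      have : keys = [] := by
        cases keys with
        | nil => rfl
        | cons a t => simp at hlen
      simp [this]

theorem pvRecB_eq (m : List (String × List String)) :
    ∀ (f : Nat) (k : String),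
      pvRecB m f k = ((pvChildren m k).map (pvG m f)).sum := by
  intro f
  induction f with
  | zero => intro k; simp [pvRecB, pvG_zero_sum]
  | succ f ih =>
    intro k
    rw [pvRecB]
    rw [PySem.List.foldl_add
      (g := fun c => (1 + (if (m.lookup c).isSome then pvRecB m f c else 0) : Int))]
    rw [zero_add]
    apply congrArg
    apply List.map_congr_left
    intro c _
    rw [pvG]
    split <;> simp [ih]

-- ===== VERDICT (by name: the statement is the Claim_ definition above) =====
theorem count_orbits_with_key_spec : Claim_equal_count_orbits_with_key := by
  intro key m _ _
  unfold Spec_count_orbits_with_key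
  cases h : m.lookup key with
  | none => simp [count_orbits_with_key, count_orbits_with_key_alt, h]
  | some ks =>
    simp only [count_orbits_with_key, count_orbits_with_key_alt, h]
    rw [pvLoopA_eq]
    rw [PySem.List.foldl_add
      (g := fun k => (1 + (if (m.lookup k).isSome then pvRecB m (m.length + 1) k else 0) : Int))]
    rw [zero_add, zero_add]
    apply congrArg
    apply List.map_congr_left
    intro k _
    show pvG m (m.length + 1 + 1) k = _
    rw [pvG]
    split <;> simp [pvRecB_eq]
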